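-- pv_equiv track=rewrite | github.com/Atharva-Git01/RaiyaRecuritment_Parser | code_preview/matcher.py | _contains_substring_list
-- ===== SOURCE A (Python) =====
-- from typing import Any, Dict, List
--
-- def _contains_substring_list(source: List[str], targets: List[str]) -> int:
--     """
--     Return number of target items that appear as substring in any source item.
--     Case-insensitive, substring-based.
--     """
--     if not isinstance(source, list):
--         return 0
--     if not isinstance(targets, list) or len(targets) == 0:
--         return 0
--
--     src = [str(s).lower() for s in source if s]
--     matched = 0
--     for t in targets:
--         t = str(t).lower().strip()
--         if not t:
--             continue
--         for s in src:
--             if t in s: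
--                 matched += 1
--                 break
--     return matched
-- ===== SOURCE B (Python) =====
-- from typing import List
--
-- def _contains_substring_list(source: List[str], targets: List[str]) -> int:
--     """Count targets appearing (case-insensitively) as substring of some source item.
--
--     Builds a multiplicity table of the normalized targets first, so each DISTINCT
--     normalized pattern scans the sources at most once; duplicate targets are
--     credited by weight instead of being re-searched.
--     """
--     if not isinstance(source, list):
--         return 0
--     if not isinstance(targets, list) or len(targets) == 0:
--         return 0
--     counts = {}
--     for t in targets:
--         u = str(t).lower().strip()
--         if u:
--             counts[u] = counts.get(u, 0) + 1
--     srcs = [str(s).lower() for s in source if s]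
--     matched = 0
--     for u, c in counts.items():
--         for s in srcs:
--             if u in s:
--                 matched += c
--                 break
--     return matched
-- ===== Notes on version B (the rewrite author's own statement) =====
-- stated objective: alternative
-- what changed: B builds a multiplicity table of normalized targets once and scans the sources at most once per DISTINCT pattern, crediting duplicate targets by weight, instead of re-scanning the sources for every target occurrence.
import Mathlib
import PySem

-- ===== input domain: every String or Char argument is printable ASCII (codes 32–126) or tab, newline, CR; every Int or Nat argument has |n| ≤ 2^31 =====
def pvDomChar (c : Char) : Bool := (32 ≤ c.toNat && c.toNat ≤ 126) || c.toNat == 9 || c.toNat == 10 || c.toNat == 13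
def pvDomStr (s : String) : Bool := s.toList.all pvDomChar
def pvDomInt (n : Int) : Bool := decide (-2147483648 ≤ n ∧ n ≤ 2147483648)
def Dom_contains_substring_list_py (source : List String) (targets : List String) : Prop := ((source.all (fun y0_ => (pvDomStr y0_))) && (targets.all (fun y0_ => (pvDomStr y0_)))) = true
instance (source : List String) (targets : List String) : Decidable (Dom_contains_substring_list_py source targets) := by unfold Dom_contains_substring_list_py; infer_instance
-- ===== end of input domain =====

-- B replaces A's rescan-of-all-sources-per-target by a multiplicity table of the distinct
-- normalized targets, scanned once each and credited by weight (alternative decomposition).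

-- ===== PORT A =====
def contains_substring_list_py (source : List String) (targets : List String) : Int :=
  if targets.length = 0 then 0
  else
    let src := (source.filter (fun s => s ≠ "")).map (fun s => PySem.Str.lower s)
    targets.foldl (fun matched t =>
      let u := PySem.Str.strip (PySem.Str.lower t)
      if u = "" then matched
      else if src.any (fun s => PySem.Str.isIn u s) then matched + 1 else matched) 0

-- ===== PORT B =====
def contains_substring_list_py_alt (source : List String) (targets : List String) : Int :=
  if targets.length = 0 then 0
  else
    let counts := targets.foldl (fun d t =>
      let u := PySem.Str.strip (PySem.Str.lower t)
      if u = "" then d else d.insert u (d.getD u 0 + 1)) (PySem.Dict.empty : PySem.Dict String Int)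
    let srcs := (source.filter (fun s => s ≠ "")).map (fun s => PySem.Str.lower s)
    counts.items.foldl (fun matched kv =>
      if srcs.any (fun s => PySem.Str.isIn kv.1 s) then matched + kv.2 else matched) 0

-- ===== PRECONDITION & SPEC =====
def Spec_contains_substring_list_py (source : List String) (targets : List String) (out : Int) : Prop := out = contains_substring_list_py_alt source targets
instance (source : List String) (targets : List String) (out : Int) : Decidable (Spec_contains_substring_list_py source targets out) := by unfold Spec_contains_substring_list_py; infer_instance

-- ===== CLAIM (what is proved, stated in full; the proofs are below) =====
def Claim_equal_contains_substring_list_py : Prop := ∀ (source : List String) (targets : List String), Dom_contains_substring_list_py source targets → Spec_contains_substring_list_py source targets (contains_substring_list_py source targets)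

-- ===== LEMMAS AND PROOFS =====

-- A's target loop counts the nonempty normalized targets matched by some source.
theorem pv_foldA (srcs : List String) : ∀ (l : List String) (a : Int),
    l.foldl (fun matched t =>
      if PySem.Str.strip (PySem.Str.lower t) = "" then matched
      else if srcs.any (fun s => PySem.Str.isIn (PySem.Str.strip (PySem.Str.lower t)) s) then matched + 1 else matched) a
    = a + (((l.map (fun t => PySem.Str.strip (PySem.Str.lower t))).filter (fun u => u ≠ "")).countP
        (fun u => srcs.any (fun s => PySem.Str.isIn u s)) : Int) := by
  intro l
  induction l with
  | nil => intro a; simp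
  | cons x l ih =>
    intro a
    rw [List.foldl_cons, List.map_cons, List.filter_cons]
    by_cases hx : PySem.Str.strip (PySem.Str.lower x) = ""
    · rw [if_pos hx, ih, if_neg (by simpa using hx)]
    · rw [if_neg hx]
      have hx' : (decide (PySem.Str.strip (PySem.Str.lower x) ≠ "")) = true := by simpa using hx
      rw [if_pos hx']
      simp only [List.countP_cons]
      by_cases hq : (srcs.any (fun s => PySem.Str.isIn (PySem.Str.strip (PySem.Str.lower x)) s)) = true
      · rw [if_pos hq, ih, if_pos hq]
        push_cast; ring
      · rw [if_neg hq, ih, if_neg hq]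
        push_cast; ring

-- B's counting loop skips empty normalized targets: it is the insert-count loop over the nonempty ones
theorem pv_foldB : ∀ (l : List String) (d : PySem.Dict String Int),
    l.foldl (fun d t =>
      if PySem.Str.strip (PySem.Str.lower t) = "" then d
      else d.insert (PySem.Str.strip (PySem.Str.lower t)) (d.getD (PySem.Str.strip (PySem.Str.lower t)) 0 + 1)) d
    = ((l.map (fun t => PySem.Str.strip (PySem.Str.lower t))).filter (fun u => u ≠ "")).foldl
        (fun d u => d.insert u (d.getD u 0 + 1)) d := by
  intro l
  induction l with
  | nil => intro d; simp
  | cons x l ih =>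
    intro d
    rw [List.foldl_cons, List.map_cons, List.filter_cons]
    by_cases hx : PySem.Str.strip (PySem.Str.lower x) = ""
    · rw [if_pos hx, ih, if_neg (by simpa using hx)]
    · have hx' : (decide (PySem.Str.strip (PySem.Str.lower x) ≠ "")) = true := by simpa using hx
      rw [if_neg hx, ih, if_pos hx', List.foldl_cons]

-- B's items loop as a weighted sum
theorem pv_foldPairs (srcs : List String) : ∀ (L : List (String × Int)) (a : Int),
    L.foldl (fun matched kv => if srcs.any (fun s => PySem.Str.isIn kv.1 s) then matched + kv.2 else matched) a
    = a + (L.map (fun kv => if srcs.any (fun s => PySem.Str.isIn kv.1 s) then kv.2 else 0)).sum := by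
  intro L
  induction L with
  | nil => intro a; simp
  | cons kv L ih =>
    intro a
    rw [List.foldl_cons, List.map_cons, List.sum_cons]
    by_cases h : (srcs.any (fun s => PySem.Str.isIn kv.1 s)) = true
    · rw [if_pos h, ih, if_pos h]; ring
    · rw [if_neg h, ih, if_neg h]; ring

-- first-occurrence dedup of a cons
theorem pv_ofList_cons (x : String) (l : List String) :
    PySem.Set.ofList (x :: l) = x :: (PySem.Set.ofList l).filter (fun y => y ≠ x) := by
  have h1 : PySem.Set.ofList (x :: l) = PySem.Set.update [x] l := by
    rw [PySem.Set.ofList_eq_foldl]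
    show l.foldl PySem.Set.add (PySem.Set.add [] x) = _
    rfl
  rw [h1, PySem.Set.update_eq_append_filter]
  simp only [List.singleton_append, List.cons.injEq, true_and]
  apply List.filter_congr
  intro a _
  show (!PySem.Set.contains [x] a) = decide (a ≠ x)
  simp [PySem.Set.contains_eq_listContains]

-- dropping one element from a nodup list drops exactly its summand
theorem pv_sum_filter_ne (F : String → Int) (x : String) :
    ∀ (L : List String), L.Nodup →
      ((L.filter (fun y => y ≠ x)).map F).sum
        = (L.map F).sum - (if x ∈ L then F x else 0) := by
  intro L
  induction L with
  | nil => intro _; simp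
  | cons y L ih =>
    intro hnd
    rcases List.nodup_cons.mp hnd with ⟨hy, hnd'⟩
    by_cases hxy : y = x
    · subst hxy
      have hfl : L.filter (fun z => !decide (z = y)) = L := by
        apply List.filter_eq_self.mpr
        intro a ha
        simp only [Bool.not_eq_eq_eq_not, Bool.not_true, decide_eq_false_iff_not]
        rintro rfl; exact hy ha
      simp [hfl]
    · have hmem : (x ∈ y :: L) ↔ (x ∈ L) := by
        constructor
        · intro h; rcases List.mem_cons.mp h with h | h
          · exact absurd h.symm hxy
          · exact h
        · exact fun h => List.mem_cons_of_mem _ h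
      simp only [List.filter_cons, List.map_cons, List.sum_cons]
      rw [if_pos (by simpa using hxy), List.map_cons, List.sum_cons, ih hnd']
      by_cases hxL : x ∈ L <;> simp [hxL, hmem] <;> ring

-- weighted sum over the distinct elements = weighted count over the list
theorem pv_sum_dedup (Q : String → Bool) : ∀ (l : List String),
    ((PySem.Set.ofList l).map (fun k => if Q k then (l.count k : Int) else 0)).sum
      = (l.countP Q : Int) := by
  intro l
  induction l with
  | nil => simp [PySem.Set.ofList]
  | cons x l ih =>
    rw [pv_ofList_cons, List.map_cons, List.sum_cons]
    have hcongr : ((PySem.Set.ofList l).filter (fun y => y ≠ x)).map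
          (fun k => if Q k then ((x :: l).count k : Int) else 0)
        = ((PySem.Set.ofList l).filter (fun y => y ≠ x)).map
          (fun k => if Q k then (l.count k : Int) else 0) := by
      apply List.map_congr_left
      intro k hk
      have hkx : k ≠ x := by
        have := (List.mem_filter.mp hk).2
        simpa using this
      simp [Ne.symm hkx]
    rw [hcongr, pv_sum_filter_ne _ _ _ (PySem.Set.nodup_ofList l)]
    have hmem : (x ∈ PySem.Set.ofList l) ↔ x ∈ l := PySem.Set.mem_ofList l x
    rw [List.countP_cons, List.count_cons_self]
    by_cases hQ : Q x
    · by_cases hxl : x ∈ l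
      · simp only [ih, hQ, if_pos, hmem, hxl]
        push_cast; ring
      · have hc0 : l.count x = 0 := List.count_eq_zero.mpr hxl
        simp only [ih, hQ, if_pos, hmem, hxl, if_false, hc0]
        push_cast; ring
    · by_cases hxl : x ∈ l <;>
        simp only [ih, hQ, hmem, hxl, if_false, if_true] <;> push_cast <;> ring

-- ===== VERDICT (by name: the statement is the Claim_ definition above) =====
theorem contains_substring_list_py_spec : Claim_equal_contains_substring_list_py := by
  intro source targets _
  unfold Spec_contains_substring_list_py contains_substring_list_py contains_substring_list_py_alt
  by_cases h : targets.length = 0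
  · rw [if_pos h, if_pos h]
  · rw [if_neg h, if_neg h]
    rw [pv_foldA, pv_foldB, PySem.Dict.foldl_insert_getD_add_one_eq_counter, pv_foldPairs,
        PySem.Dict.items_counter, List.map_map]
    simp only [Function.comp_def, pv_sum_dedup]
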